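-- pv_equiv track=rewrite | github.com/KranthiPedamajji/resume_gen | app/services/resume_state.py | _split_header
-- ===== SOURCE A (Python) =====
-- from typing import Dict, List, Optional
--
-- _HEADING_MAP = {
--     "PROFESSIONAL SUMMARY": "professional_summary",
--     "TECHNICAL SKILLS": "technical_skills",
--     "CORE SKILLS": "technical_skills",
--     "PROFESSIONAL EXPERIENCE": "experience",
--     "EXPERIENCE HIGHLIGHTS": "experience",
--     "EDUCATION": "education",
-- }
--
-- def _split_header(lines: List[str]) -> tuple[List[str], List[str]]:
--     header = []
--     body = []
--     in_body = False
--     for line in lines: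
--         heading = _detect_heading(line)
--         if heading and not in_body:
--             in_body = True
--             body.append(line)
--             continue
--         if in_body:
--             body.append(line)
--         else:
--             header.append(line)
--     return header, body
--
-- def _detect_heading(line: str) -> Optional[str]:
--     normalized = _normalize_heading(line)
--     return _HEADING_MAP.get(normalized)
--
-- def _normalize_heading(line: str) -> str:
--     cleaned = line.strip().lstrip("#").strip()
--     cleaned = cleaned.replace("**", "").replace("__", "").replace("*", "")
--     return cleaned.upper()
-- ===== SOURCE B (Python) =====
-- from typing import Dict, List, Optional
--
-- _HEADING_MAP = {
--     "PROFESSIONAL SUMMARY": "professional_summary",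
--     "TECHNICAL SKILLS": "technical_skills",
--     "CORE SKILLS": "technical_skills",
--     "PROFESSIONAL EXPERIENCE": "experience",
--     "EXPERIENCE HIGHLIGHTS": "experience",
--     "EDUCATION": "education",
-- }
--
-- _HEADINGS = frozenset(_HEADING_MAP)
--
-- def _normalize_heading(line: str) -> str:
--     cleaned = line.strip().lstrip("#").strip()
--     cleaned = cleaned.replace("**", "").replace("__", "").replace("*", "")
--     return cleaned.upper()
--
-- def _is_heading(line: str) -> bool:
--     return _normalize_heading(line) in _HEADINGS
--
-- def _split_header(lines: List[str]) -> tuple[List[str], List[str]]: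
--     for i, line in enumerate(lines):
--         if _is_heading(line):
--             return lines[:i], lines[i:]
--     return list(lines), []
-- ===== Notes on version B (the rewrite author's own statement) =====
-- stated objective: alternative
-- what changed: B detects headings by set membership of the normalized line (instead of truthiness of a dict lookup) and returns slices lines[:i], lines[i:] at the first heading index found by an enumerate scan with early return, replacing A's stateful loop with an in_body flag and per-line append branching.
import Mathlib
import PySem

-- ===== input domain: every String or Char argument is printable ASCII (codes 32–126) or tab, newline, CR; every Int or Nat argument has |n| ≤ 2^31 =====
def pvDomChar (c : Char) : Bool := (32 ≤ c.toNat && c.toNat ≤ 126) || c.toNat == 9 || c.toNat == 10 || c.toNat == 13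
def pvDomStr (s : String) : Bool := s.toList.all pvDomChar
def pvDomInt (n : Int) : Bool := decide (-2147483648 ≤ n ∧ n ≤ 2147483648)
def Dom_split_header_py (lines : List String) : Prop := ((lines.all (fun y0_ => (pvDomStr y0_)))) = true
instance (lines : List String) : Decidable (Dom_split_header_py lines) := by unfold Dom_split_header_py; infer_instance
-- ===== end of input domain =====

-- B detects headings by set membership of the normalized line and returns the slices
-- lines[:i], lines[i:] at the first heading found by an early-return indexed scan,
-- replacing A's stateful loop (dict lookup, in_body flag, per-line append branching); objective: alternative.

-- shared helper (both Pythons define _normalize_heading verbatim)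
def pvNormalizeHeading (line : String) : String :=
  let cleaned := PySem.Chars.strip line.toList
  -- .lstrip("#") ported by hand: drop leading '#' characters (exact for a one-char strip set)
  let cleaned := PySem.Chars.strip (cleaned.dropWhile (· == '#'))
  let cleaned := PySem.Chars.replace
      (PySem.Chars.replace (PySem.Chars.replace cleaned "**".toList "".toList)
        "__".toList "".toList) "*".toList "".toList
  String.ofList (PySem.Chars.upper cleaned)

-- ===== PORT A =====
def pvHeadingMap : PySem.Dict String String :=
  ((((((PySem.Dict.empty).insert "PROFESSIONAL SUMMARY" "professional_summary").insert
      "TECHNICAL SKILLS" "technical_skills").insert "CORE SKILLS" "technical_skills").insert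
      "PROFESSIONAL EXPERIENCE" "experience").insert "EXPERIENCE HIGHLIGHTS" "experience").insert
      "EDUCATION" "education"

def pvDetectHeading (line : String) : Option String :=
  pvHeadingMap.get? (pvNormalizeHeading line)

-- Python truthiness of an Optional[str]: None and "" are falsy
def pvTruthy : Option String → Bool
  | none => false
  | some s => s ≠ ""

-- the for-loop of A, state (header, body, in_body)
def pvLoopA : List String → List String → List String → Bool → List String × List String
  | [], header, body, _ => (header, body)
  | line :: rest, header, body, in_body =>
    if pvTruthy (pvDetectHeading line) && !in_body then
      pvLoopA rest header (body ++ [line]) true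
    else if in_body then
      pvLoopA rest header (body ++ [line]) in_body
    else
      pvLoopA rest (header ++ [line]) body in_body

def split_header_py (lines : List String) : List String × List String :=
  pvLoopA lines [] [] false

-- ===== PORT B =====
-- frozenset(_HEADING_MAP) = the distinct keys, as a PySem.Set
def pvHeadingsSet : PySem.Set String :=
  PySem.Set.ofList ["PROFESSIONAL SUMMARY", "TECHNICAL SKILLS", "CORE SKILLS",
                    "PROFESSIONAL EXPERIENCE", "EXPERIENCE HIGHLIGHTS", "EDUCATION"]

def pvIsHeading (line : String) : Bool :=
  pvHeadingsSet.contains (pvNormalizeHeading line)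

-- B's 'for i, line in enumerate(lines): if heading: return lines[:i], lines[i:]'
def pvGoB (lines : List String) : Nat → List String → List String × List String
  | _, [] => (lines, [])
  | i, line :: rest =>
    if pvIsHeading line then (lines.take i, lines.drop i) else pvGoB lines (i + 1) rest

def split_header_py_alt (lines : List String) : List String × List String :=
  pvGoB lines 0 lines

-- ===== PRECONDITION & SPEC =====
def Spec_split_header_py (lines : List String) (out : List String × List String) : Prop := out = split_header_py_alt lines
instance (lines : List String) (out : List String × List String) : Decidable (Spec_split_header_py lines out) := by unfold Spec_split_header_py; infer_instance

-- ===== CLAIM (what is proved, stated in full; the proofs are below) =====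
def Claim_equal_split_header_py : Prop := ∀ (lines : List String), Dom_split_header_py lines → Spec_split_header_py lines (split_header_py lines)

-- ===== LEMMAS AND PROOFS =====
-- A's truthy dict lookup and B's set membership agree (the map's values are all nonempty)
theorem truthy_eq_isHeading (line : String) :
    pvTruthy (pvDetectHeading line) = pvIsHeading line := by
  unfold pvDetectHeading pvIsHeading
  generalize pvNormalizeHeading line = s
  by_cases h1 : s = "PROFESSIONAL SUMMARY"
  · subst h1; decide
  by_cases h2 : s = "TECHNICAL SKILLS"
  · subst h2; decide
  by_cases h3 : s = "CORE SKILLS"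
  · subst h3; decide
  by_cases h4 : s = "PROFESSIONAL EXPERIENCE"
  · subst h4; decide
  by_cases h5 : s = "EXPERIENCE HIGHLIGHTS"
  · subst h5; decide
  by_cases h6 : s = "EDUCATION"
  · subst h6; decide
  have e1 : ("PROFESSIONAL SUMMARY" == s) = false := beq_eq_false_iff_ne.mpr (Ne.symm h1)
  have e2 : ("TECHNICAL SKILLS" == s) = false := beq_eq_false_iff_ne.mpr (Ne.symm h2)
  have e3 : ("CORE SKILLS" == s) = false := beq_eq_false_iff_ne.mpr (Ne.symm h3)
  have e4 : ("PROFESSIONAL EXPERIENCE" == s) = false := beq_eq_false_iff_ne.mpr (Ne.symm h4)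
  have e5 : ("EXPERIENCE HIGHLIGHTS" == s) = false := beq_eq_false_iff_ne.mpr (Ne.symm h5)
  have e6 : ("EDUCATION" == s) = false := beq_eq_false_iff_ne.mpr (Ne.symm h6)
  simp [pvHeadingMap, pvHeadingsSet, PySem.Dict.insert, PySem.Dict.empty, PySem.Dict.get?,
        PySem.Set.ofList, PySem.Set.add, PySem.Set.contains, List.find?, pvTruthy,
        e1, e2, e3, e4, e5, e6, h1, h2, h3, h4, h5, h6]

theorem pvLoopA_true (l : List String) : ∀ (h b : List String),
    pvLoopA l h b true = (h, b ++ l) := by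
  induction l with
  | nil => intro h b; simp [pvLoopA]
  | cons a t ih =>
    intro h b
    simp [pvLoopA, ih]

theorem pvLoopA_false (l : List String) : ∀ (h : List String),
    pvLoopA l h [] false =
      (h ++ l.take (l.findIdx pvIsHeading), l.drop (l.findIdx pvIsHeading)) := by
  induction l with
  | nil => intro h; simp [pvLoopA]
  | cons a t ih =>
    intro h
    by_cases hp : pvIsHeading a = true
    · simp [pvLoopA, truthy_eq_isHeading, hp, pvLoopA_true, List.findIdx_cons]
    · simp [pvLoopA, truthy_eq_isHeading, hp, ih, List.findIdx_cons]

theorem pvGoB_spec (lines : List String) : ∀ (l : List String) (i : Nat),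
    l = lines.drop i →
    pvGoB lines i l = (lines.take (i + l.findIdx pvIsHeading), lines.drop (i + l.findIdx pvIsHeading)) := by
  intro l
  induction l with
  | nil =>
    intro i hd
    have hlen : lines.length ≤ i := by
      have := congrArg List.length hd
      simp at this; omega
    simp [pvGoB, List.take_of_length_le hlen, List.drop_of_length_le hlen]
  | cons a t ih =>
    intro i hd
    by_cases hp : pvIsHeading a = true
    · simp [pvGoB, hp, List.findIdx_cons]
    · have ht : t = lines.drop (i + 1) := by
        have := congrArg (List.drop 1) hd
        simpa [List.drop_drop, Nat.add_comm] using this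
      simp [pvGoB, hp, List.findIdx_cons, ih (i + 1) ht, Nat.add_assoc, Nat.add_comm 1]

-- ===== VERDICT (by name: the statement is the Claim_ definition above) =====
theorem split_header_py_spec : Claim_equal_split_header_py := by
  intro lines _
  unfold Spec_split_header_py split_header_py split_header_py_alt
  rw [pvLoopA_false, pvGoB_spec lines lines 0 (by simp)]
  simp
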